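-- pv_equiv track=rewrite | github.com/TruongVinhKiet/Vietnam-TaxInspector | Backend/app/scripts/run_specialized_go_no_go_review.py | _count_consecutive_hard_pass
-- ===== SOURCE A (Python) =====
-- from typing import Any
--
-- def _count_consecutive_hard_pass(history_rows: list[dict[str, Any]], current_hard_pass: bool) -> int:
--     sequence = [bool(row.get("hard_gates_pass", False)) for row in history_rows]
--     sequence.append(bool(current_hard_pass))
--
--     streak = 0
--     for passed in reversed(sequence):
--         if passed:
--             streak += 1
--         else:
--             break
--     return streak
-- ===== SOURCE B (Python) =====
-- def _count_consecutive_hard_pass(history_rows, current_hard_pass):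
--     # Forward pass: running streak resets to 0 on a failing gate,
--     # so the final value is the trailing consecutive-pass count.
--     streak = 0
--     for row in history_rows:
--         if row.get("hard_gates_pass", False):
--             streak += 1
--         else:
--             streak = 0
--     return streak + 1 if current_hard_pass else 0
-- ===== Notes on version B (the rewrite author's own statement) =====
-- stated objective: alternative
-- what changed: Replaces the build-list-then-scan-reversed-with-break approach by a single forward pass with a reset-on-false running counter (no intermediate sequence list, no reversal, no break).
import Mathlib
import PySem

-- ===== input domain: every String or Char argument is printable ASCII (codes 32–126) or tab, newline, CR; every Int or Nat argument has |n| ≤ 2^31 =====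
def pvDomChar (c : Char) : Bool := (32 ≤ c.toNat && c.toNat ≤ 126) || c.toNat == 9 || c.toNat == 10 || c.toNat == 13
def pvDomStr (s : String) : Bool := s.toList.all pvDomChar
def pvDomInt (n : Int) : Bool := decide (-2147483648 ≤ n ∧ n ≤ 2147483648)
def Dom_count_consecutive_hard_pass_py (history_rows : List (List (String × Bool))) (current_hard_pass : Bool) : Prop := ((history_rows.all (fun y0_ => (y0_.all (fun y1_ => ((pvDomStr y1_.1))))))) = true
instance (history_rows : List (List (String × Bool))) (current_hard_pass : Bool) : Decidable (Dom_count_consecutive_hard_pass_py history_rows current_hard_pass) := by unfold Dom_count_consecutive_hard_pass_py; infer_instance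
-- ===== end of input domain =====

-- B replaces A's build-list-then-reversed-scan-with-break by one forward pass with a
-- reset-on-false running counter (alternative decomposition, same O(n) cost).

-- ===== PORT A =====
-- the 'for passed in reversed(sequence): if passed: streak += 1 else: break' loop
def pvALoop : List Bool → Int → Int
  | [], streak => streak
  | p :: rest, streak => if p then pvALoop rest (streak + 1) else streak

def count_consecutive_hard_pass_py (history_rows : List (List (String × Bool))) (current_hard_pass : Bool) : Int :=
  let sequence :=
    (history_rows.map (fun row => (PySem.Dict.ofList row).getD "hard_gates_pass" false))
      ++ [current_hard_pass]
  pvALoop sequence.reverse 0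

-- ===== PORT B =====
def count_consecutive_hard_pass_py_alt (history_rows : List (List (String × Bool))) (current_hard_pass : Bool) : Int :=
  let streak := history_rows.foldl
    (fun acc row => if (PySem.Dict.ofList row).getD "hard_gates_pass" false then acc + 1 else 0)
    (0 : Int)
  if current_hard_pass then streak + 1 else 0

-- ===== PRECONDITION & SPEC =====
def Spec_count_consecutive_hard_pass_py (history_rows : List (List (String × Bool))) (current_hard_pass : Bool) (out : Int) : Prop := out = count_consecutive_hard_pass_py_alt history_rows current_hard_pass
instance (history_rows : List (List (String × Bool))) (current_hard_pass : Bool) (out : Int) : Decidable (Spec_count_consecutive_hard_pass_py history_rows current_hard_pass out) := by unfold Spec_count_consecutive_hard_pass_py; infer_instance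

-- ===== CLAIM (what is proved, stated in full; the proofs are below) =====
def Claim_equal_count_consecutive_hard_pass_py : Prop := ∀ (history_rows : List (List (String × Bool))) (current_hard_pass : Bool), Dom_count_consecutive_hard_pass_py history_rows current_hard_pass → Spec_count_consecutive_hard_pass_py history_rows current_hard_pass (count_consecutive_hard_pass_py history_rows current_hard_pass)

-- ===== LEMMAS AND PROOFS =====

theorem pvALoop_shift (l : List Bool) (a k : Int) :
    pvALoop l (a + k) = pvALoop l a + k := by
  induction l generalizing a with
  | nil => rfl
  | cons p rest ih =>
    simp only [pvALoop]
    by_cases hp : p <;> simp [hp, ← ih, add_right_comm]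

theorem pvALoop_reverse_eq_foldl (l : List Bool) :
    pvALoop l.reverse 0 = l.foldl (fun acc p => if p then acc + 1 else 0) (0 : Int) := by
  induction l using List.reverseRecOn with
  | nil => rfl
  | append_singleton l b ih =>
    rw [List.reverse_append]
    simp only [List.reverse_cons, List.reverse_nil, List.nil_append, List.singleton_append,
      pvALoop, List.foldl_append, List.foldl_cons, List.foldl_nil]
    by_cases hb : b
    · have h := pvALoop_shift l.reverse 0 1
      rw [zero_add] at h
      simp [hb, h, ih]
    · simp [hb]

theorem count_consecutive_hard_pass_py_spec : Claim_equal_count_consecutive_hard_pass_py := by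
  intro history_rows c _
  unfold Spec_count_consecutive_hard_pass_py count_consecutive_hard_pass_py
    count_consecutive_hard_pass_py_alt
  simp only [List.reverse_append, List.reverse_cons, List.reverse_nil, List.nil_append,
    List.singleton_append, pvALoop]
  by_cases hc : c
  · have h := pvALoop_shift ((history_rows.map (fun row => (PySem.Dict.ofList row).getD "hard_gates_pass" false)).reverse) 0 1
    rw [zero_add] at h
    simp only [hc, if_true]
    rw [zero_add, h, pvALoop_reverse_eq_foldl, List.foldl_map]
  · simp [hc]
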